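-- pv_equiv track=rewrite | github.com/SannanR/tf-ntf-classification | web.py | rawMoments
-- ===== SOURCE A (Python) =====
-- def rawMoments(mat, order):
--     n = len(mat)
--     rawM = []
--     sum = 0
--     i = 0
--     for i in range(order + 1):
--         j = 0
--         for j in range(order + 1):
--             if i + j <= order:
--                 p = 0
--                 for p in range(n):
--                     q = 0
--                     for q in range(n):
--                         sum = sum + (((p + 1) ** i) * ((q + 1) ** j) * int(mat[p][q]))
--                 rawM.append(sum)
--                 sum = 0
--     return rawM
-- ===== SOURCE B (Python) =====
-- def rawMoments(mat, order):
--     n = len(mat)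
--     # separable: per-row sums of (q+1)**j * value, then combine with row powers
--     T = [[sum((q + 1) ** j * int(mat[p][q]) for q in range(n)) for p in range(n)]
--          for j in range(order + 1)]
--     return [sum((p + 1) ** i * T[j][p] for p in range(n))
--             for i in range(order + 1) for j in range(order + 1) if i + j <= order]
-- ===== Notes on version B (the rewrite author's own statement) =====
-- stated objective: faster
-- what changed: Replaces the quadratic-in-order quadruple loop (recomputing a full n*n double sum for every (i,j)) by a separable scheme: per-row column-power sums T[j][p] are precomputed once, and each moment becomes a single length-n sum, O(order*n^2 + order^2*n) instead of O(order^2*n^2).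
import Mathlib
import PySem

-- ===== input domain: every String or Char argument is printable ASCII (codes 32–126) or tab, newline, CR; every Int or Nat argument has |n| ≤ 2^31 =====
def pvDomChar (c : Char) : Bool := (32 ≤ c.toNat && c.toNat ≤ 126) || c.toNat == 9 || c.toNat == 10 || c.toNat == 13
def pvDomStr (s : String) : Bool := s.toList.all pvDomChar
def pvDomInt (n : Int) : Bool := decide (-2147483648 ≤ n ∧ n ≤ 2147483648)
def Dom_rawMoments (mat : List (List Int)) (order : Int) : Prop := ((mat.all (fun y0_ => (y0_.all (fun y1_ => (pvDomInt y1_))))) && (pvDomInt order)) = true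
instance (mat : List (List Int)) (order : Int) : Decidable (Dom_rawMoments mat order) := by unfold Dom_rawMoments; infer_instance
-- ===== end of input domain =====

-- B replaces A's quadruple loop by a separable scheme (a precomputed table of per-row
-- column-power sums combined with row powers) — asymptotically faster in the order parameter.

-- ===== PORT A =====
-- literal transliteration of A: state is the pair (rawM, sum); sum is reset to 0 after each append
def rawMoments (mat : List (List Int)) (order : Int) : List Int :=
  let n : Int := (mat.length : Int)
  ((PySem.List.pyRange 0 (order + 1) 1).foldl (fun (st : List Int × Int) i =>
    (PySem.List.pyRange 0 (order + 1) 1).foldl (fun (st : List Int × Int) j =>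
      if i + j ≤ order then
        (st.1 ++ [(PySem.List.pyRange 0 n 1).foldl (fun s p =>
          (PySem.List.pyRange 0 n 1).foldl (fun s q =>
            s + ((p + 1) ^ i.toNat) * ((q + 1) ^ j.toNat) *
              PySem.List.pyGetD (PySem.List.pyGetD mat p []) q 0) s) st.2], (0 : Int))
      else st) st) (([] : List Int), (0 : Int))).1

-- ===== PORT B =====
-- transliteration of Source B: table T of per-row column-power sums, then one flat comprehension
def rawMoments_alt (mat : List (List Int)) (order : Int) : List Int :=
  let n : Int := (mat.length : Int)
  let T : List (List Int) :=
    (PySem.List.pyRange 0 (order + 1) 1).map (fun j =>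
      (PySem.List.pyRange 0 n 1).map (fun p =>
        ((PySem.List.pyRange 0 n 1).map (fun q =>
          ((q + 1) ^ j.toNat) * PySem.List.pyGetD (PySem.List.pyGetD mat p []) q 0)).sum))
  (PySem.List.pyRange 0 (order + 1) 1).flatMap (fun i =>
    ((PySem.List.pyRange 0 (order + 1) 1).filter (fun j => decide (i + j ≤ order))).map (fun j =>
      ((PySem.List.pyRange 0 n 1).map (fun p =>
        ((p + 1) ^ i.toNat) *
          PySem.List.pyGetD (PySem.List.pyGetD T j ([] : List Int)) p 0)).sum))

-- ===== PRECONDITION & SPEC =====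
-- Pre_ excludes exactly the ragged matrices on which Python A raises IndexError:
-- when 0 ≤ order, A reads mat[p][q] for all p, q < len(mat), so every row needs
-- at least len(mat) entries (for order < 0 the loops never run and A returns []).
def Pre_rawMoments (mat : List (List Int)) (order : Int) : Prop :=
  0 ≤ order → ∀ row ∈ mat, mat.length ≤ row.length
instance (mat : List (List Int)) (order : Int) : Decidable (Pre_rawMoments mat order) := by
  unfold Pre_rawMoments; infer_instance
def pvWitness_rawMoments : List (List Int) × Int := ([[1, 2], [3, 4]], 2)

def Spec_rawMoments (mat : List (List Int)) (order : Int) (out : List Int) : Prop := out = rawMoments_alt mat order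
instance (mat : List (List Int)) (order : Int) (out : List Int) : Decidable (Spec_rawMoments mat order out) := by unfold Spec_rawMoments; infer_instance

-- ===== CLAIM (what is proved, stated in full; the proofs are below) =====
def Claim_equal_rawMoments : Prop := ∀ (mat : List (List Int)) (order : Int), Dom_rawMoments mat order → Pre_rawMoments mat order → Spec_rawMoments mat order (rawMoments mat order)

-- ===== LEMMAS AND PROOFS =====

-- A's two output-building loops at once: the pair-state fold with append-and-reset
-- equals a flatMap of filtered maps, each entry computed from a fresh sum 0.
theorem pv_loops (P : Int → Int → Prop) [inst : ∀ i j, Decidable (P i j)]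
    (F : Int → Int → Int → Int) (M : List Int) :
    ∀ (L : List Int) (acc : List Int),
      L.foldl (fun (st : List Int × Int) i =>
          M.foldl (fun (st : List Int × Int) j =>
            if P i j then (st.1 ++ [F i j st.2], (0 : Int)) else st) st) (acc, 0)
        = (acc ++ L.flatMap (fun i =>
            (M.filter (fun j => decide (P i j))).map (fun j => F i j 0)), 0) := by
  have hj : ∀ (i : Int) (Mj : List Int) (acc : List Int),
      Mj.foldl (fun (st : List Int × Int) j =>
          if P i j then (st.1 ++ [F i j st.2], (0 : Int)) else st) (acc, 0)
        = (acc ++ (Mj.filter (fun j => decide (P i j))).map (fun j => F i j 0), 0) := by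
    intro i Mj
    induction Mj with
    | nil => intro acc; simp
    | cons x xs ih =>
        intro acc
        by_cases h : P i x
        · simp [h, ih]
        · simp [h, ih]
  intro L
  induction L with
  | nil => intro acc; simp
  | cons x xs ih =>
      intro acc
      simp only [List.foldl_cons, hj x M acc, ih, List.flatMap_cons, List.append_assoc]

theorem rawMoments_spec : Claim_equal_rawMoments := by
  intro mat order _ _
  unfold Spec_rawMoments rawMoments rawMoments_alt
  dsimp only
  set n : Int := (mat.length : Int) with hn
  rw [pv_loops (fun i j => i + j ≤ order)
      (fun i j s0 => (PySem.List.pyRange 0 n 1).foldl (fun s p =>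
        (PySem.List.pyRange 0 n 1).foldl (fun s q =>
          s + ((p + 1) ^ i.toNat) * ((q + 1) ^ j.toNat) *
            PySem.List.pyGetD (PySem.List.pyGetD mat p []) q 0) s) s0)]
  simp only [List.nil_append]
  -- both sides are flatMaps over the same index list; compare entrywise
  rw [List.flatMap_def, List.flatMap_def]
  congr 1
  apply List.map_congr_left
  intro i hi
  apply List.map_congr_left
  intro j hj
  have hjr : j ∈ PySem.List.pyRange 0 (order + 1) 1 := (List.mem_filter.mp hj).1
  have hjb := PySem.List.mem_pyRange_one.mp hjr
  -- resolve B's table lookups: T[j] then T[j][p]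
  rw [PySem.List.pyGetD_map_pyRange_of_nonneg _ (order + 1) j _ hjb.1 hjb.2]
  -- A's entry: turn the nested folds into nested sums
  have hrow : ∀ s0 : Int,
      (PySem.List.pyRange 0 n 1).foldl (fun s p =>
        (PySem.List.pyRange 0 n 1).foldl (fun s q =>
          s + ((p + 1) ^ i.toNat) * ((q + 1) ^ j.toNat) *
            PySem.List.pyGetD (PySem.List.pyGetD mat p []) q 0) s) s0
      = s0 + ((PySem.List.pyRange 0 n 1).map (fun p =>
          ((PySem.List.pyRange 0 n 1).map (fun q =>
            ((p + 1) ^ i.toNat) * ((q + 1) ^ j.toNat) *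
              PySem.List.pyGetD (PySem.List.pyGetD mat p []) q 0)).sum)).sum := by
    intro s0
    simp only [PySem.List.foldl_add]
  rw [hrow 0, zero_add]
  congr 1
  apply List.map_congr_left
  intro p hp
  have hpb := PySem.List.mem_pyRange_one.mp hp
  rw [PySem.List.pyGetD_map_pyRange_of_nonneg _ n p _ hpb.1 hpb.2]
  rw [← List.sum_map_mul_left]
  congr 1
  apply List.map_congr_left
  intro q _
  ring

-- ===== VERDICT (by name: the statement is the Claim_ definition above) =====
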